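-- pv_equiv track=rewrite | github.com/avinashbatchala/ind_market_python | backend/app/services/groww_live_data.py | _dedupe_expiries
-- ===== SOURCE A (Python) =====
-- from typing import Any, Optional, Iterable
--
-- def _dedupe_expiries(expiries: Iterable[str]) -> list[str]:
--     cleaned: list[str] = []
--     seen = set()
--     for item in expiries:
--         if not item:
--             continue
--         value = str(item)
--         if value in seen:
--             continue
--         seen.add(value)
--         cleaned.append(value)
--     cleaned.sort()
--     return cleaned
-- ===== SOURCE B (Python) =====
-- def _dedupe_expiries(expiries):
--     # sort all truthy items (duplicates kept), then one linear pass keeping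
--     # each element only when it differs from the previously kept one
--     vals = sorted(str(item) for item in expiries if item)
--     result = []
--     for v in vals:
--         if not result or result[-1] != v:
--             result.append(v)
--     return result
-- ===== Notes on version B (the rewrite author's own statement) =====
-- stated objective: alternative
-- what changed: Replaces the seen-set with sort-first-then-adjacent-compare dedup: duplicates are removed in a single linear pass over the sorted list by comparing each element with the last kept one; no set is used.
import Mathlib
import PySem

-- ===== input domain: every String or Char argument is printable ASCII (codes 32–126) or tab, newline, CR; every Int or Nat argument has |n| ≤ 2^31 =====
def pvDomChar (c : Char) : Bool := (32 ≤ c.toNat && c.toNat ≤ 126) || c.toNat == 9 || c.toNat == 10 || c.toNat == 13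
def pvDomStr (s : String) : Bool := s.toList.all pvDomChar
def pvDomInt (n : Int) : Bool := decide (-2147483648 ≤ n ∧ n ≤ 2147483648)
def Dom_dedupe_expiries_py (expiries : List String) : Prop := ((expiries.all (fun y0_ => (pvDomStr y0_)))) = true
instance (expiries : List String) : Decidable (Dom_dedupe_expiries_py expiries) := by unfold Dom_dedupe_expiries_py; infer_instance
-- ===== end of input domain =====

-- B removes duplicates by sorting first and comparing each element with the previously kept one, instead of A's seen-set.

-- ===== PORT A =====
-- loop body of A: 'if not item: continue; value = str(item); if value in seen: continue; seen.add(value); cleaned.append(value)'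
def stepA (st : PySem.Set String × List String) (item : String) : PySem.Set String × List String :=
  if item = "" then st
  else
    let value := item
    if PySem.Set.contains st.1 value then st
    else (PySem.Set.add st.1 value, st.2 ++ [value])

def dedupe_expiries_py (expiries : List String) : List String :=
  PySem.List.sorted (expiries.foldl stepA (PySem.Set.empty, [])).2 (fun x => x) false

-- ===== PORT B =====
-- loop body of B: 'if not result or result[-1] != v: result.append(v)'
def stepB (result : List String) (v : String) : List String :=
  if result = [] ∨ result.getLast? ≠ some v then result ++ [v] else result

def dedupe_expiries_py_alt (expiries : List String) : List String :=
  (PySem.List.sorted ((expiries.filter (fun item => item ≠ "")).map (fun item => item))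
    (fun x => x) false).foldl stepB []

-- ===== PRECONDITION & SPEC =====
def Spec_dedupe_expiries_py (expiries : List String) (out : List String) : Prop := out = dedupe_expiries_py_alt expiries
instance (expiries : List String) (out : List String) : Decidable (Spec_dedupe_expiries_py expiries out) := by unfold Spec_dedupe_expiries_py; infer_instance

-- ===== CLAIM (what is proved, stated in full; the proofs are below) =====
def Claim_equal_dedupe_expiries_py : Prop := ∀ (expiries : List String), Dom_dedupe_expiries_py expiries → Spec_dedupe_expiries_py expiries (dedupe_expiries_py expiries)

-- ===== LEMMAS AND PROOFS =====

-- recursive form of B's adjacency-dedup loop, used only in the proofs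
def adjAux : Option String → List String → List String
  | _, [] => []
  | none, y :: ys => y :: adjAux (some y) ys
  | some p, y :: ys => if y = p then adjAux (some p) ys else y :: adjAux (some y) ys

lemma foldlB_eq_adjAux (l : List String) : ∀ acc : List String,
    l.foldl stepB acc = acc ++ adjAux acc.getLast? l := by
  induction l with
  | nil => intro acc; simp [adjAux]
  | cons y ys ih =>
    intro acc
    rw [List.foldl_cons]
    by_cases h : acc = [] ∨ acc.getLast? ≠ some y
    · have hstep : stepB acc y = acc ++ [y] := by simp only [stepB, if_pos h]
      rw [hstep, ih]
      have hl : (acc ++ [y]).getLast? = some y := by simp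
      rw [hl]
      rcases h with rfl | h
      · simp [adjAux]
      · cases hacc : acc.getLast? with
        | none => simp [adjAux]
        | some p =>
          have hyp : y ≠ p := fun e => h (by rw [hacc, e])
          simp [adjAux, hyp]
    · rw [not_or, not_not] at h
      obtain ⟨hne, hlast⟩ := h
      have hstep : stepB acc y = acc := by
        simp only [stepB]
        rw [if_neg]
        rw [not_or, not_not]
        exact ⟨hne, hlast⟩
      rw [hstep, ih, hlast]
      simp [adjAux]

lemma adjAux_chain (p : String) (l : List String) (hl : l.Pairwise (· ≤ ·))
    (hp : ∀ y ∈ l, p ≤ y) :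
    (p :: adjAux (some p) l).Pairwise (· < ·) ∧
      (∀ y, y ∈ adjAux (some p) l ↔ (y ∈ l ∧ y ≠ p)) := by
  induction l generalizing p with
  | nil => simp [adjAux]
  | cons y ys ih =>
    rw [List.pairwise_cons] at hl
    obtain ⟨hy, hys⟩ := hl
    by_cases hyp : y = p
    · subst hyp
      have hrec := ih y hys hy
      have hd : adjAux (some y) (y :: ys) = adjAux (some y) ys := by simp [adjAux]
      rw [hd]
      refine ⟨hrec.1, fun z => ?_⟩
      rw [hrec.2 z, List.mem_cons]
      constructor
      · rintro ⟨hz, hzy⟩; exact ⟨Or.inr hz, hzy⟩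
      · rintro ⟨rfl | hz, hzy⟩
        · exact absurd rfl hzy
        · exact ⟨hz, hzy⟩
    · have hpy : p < y := lt_of_le_of_ne (hp y (by simp)) (fun h => hyp h.symm)
      have hrec := ih y hys hy
      simp only [adjAux, if_neg hyp]
      constructor
      · rw [List.pairwise_cons]
        refine ⟨?_, hrec.1⟩
        intro z hz
        rcases List.mem_cons.mp hz with rfl | hz
        · exact hpy
        · exact lt_of_lt_of_le hpy (hy z ((hrec.2 z).mp hz).1)
      · intro z
        rw [List.mem_cons, hrec.2 z]
        constructor
        · rintro (rfl | ⟨hz, hzy⟩)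
          · exact ⟨List.mem_cons_self, hyp⟩
          · refine ⟨List.mem_cons_of_mem _ hz, ?_⟩
            intro e
            exact absurd (lt_of_lt_of_le hpy (hy z hz)) (by simp [e])
        · rintro ⟨hz, hzp⟩
          rcases List.mem_cons.mp hz with rfl | hz
          · exact Or.inl rfl
          · by_cases hzy : z = y
            · exact Or.inl hzy
            · exact Or.inr ⟨hz, hzy⟩

lemma adjAux_none (l : List String) (hl : l.Pairwise (· ≤ ·)) :
    (adjAux none l).Pairwise (· < ·) ∧ (∀ y, y ∈ adjAux none l ↔ y ∈ l) := by
  cases l with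
  | nil => simp [adjAux]
  | cons y ys =>
    rw [List.pairwise_cons] at hl
    have h := adjAux_chain y ys hl.2 hl.1
    simp only [adjAux]
    refine ⟨h.1, fun z => ?_⟩
    rw [List.mem_cons, h.2 z, List.mem_cons]
    constructor
    · rintro (rfl | ⟨hz, _⟩)
      · exact Or.inl rfl
      · exact Or.inr hz
    · rintro (rfl | hz)
      · exact Or.inl rfl
      · by_cases hzy : z = y
        · exact Or.inl hzy
        · exact Or.inr ⟨hz, hzy⟩

-- A's loop: both components stay equal — the first-occurrence set of the truthy items
lemma foldlA_pair (l : List String) : ∀ s : PySem.Set String,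
    l.foldl stepA (s, s)
      = ((l.filter (fun item => item ≠ "")).foldl PySem.Set.add s,
         (l.filter (fun item => item ≠ "")).foldl PySem.Set.add s) := by
  induction l with
  | nil => intro s; simp
  | cons y ys ih =>
    intro s
    rw [List.foldl_cons]
    by_cases hy : y = ""
    · subst hy
      rw [show stepA (s, s) "" = (s, s) from by simp [stepA], ih]
      simp
    · by_cases hc : PySem.Set.contains s y = true
      · have hadd : PySem.Set.add s y = s := by simp only [PySem.Set.add, if_pos hc]
        rw [show stepA (s, s) y = (s, s) from by simp only [stepA, if_neg hy, if_pos hc], ih]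
        have hfil : (y :: ys).filter (fun item => item ≠ "") = y :: ys.filter (fun item => item ≠ "") := by
          simp [hy]
        rw [hfil, List.foldl_cons, hadd]
      · have hadd : PySem.Set.add s y = s ++ [y] := by simp only [PySem.Set.add, if_neg hc]
        rw [show stepA (s, s) y = (s ++ [y], s ++ [y]) from by
          simp only [stepA, if_neg hy, if_neg hc, PySem.Set.add], ih]
        have hfil : (y :: ys).filter (fun item => item ≠ "") = y :: ys.filter (fun item => item ≠ "") := by
          simp [hy]
        rw [hfil, List.foldl_cons, hadd]

theorem ports_agree (expiries : List String) :
    dedupe_expiries_py expiries = dedupe_expiries_py_alt expiries := by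
  unfold dedupe_expiries_py dedupe_expiries_py_alt
  rw [show (PySem.Set.empty : PySem.Set String) = ([] : List String) from rfl]
  rw [foldlA_pair expiries ([] : List String)]
  set f := expiries.filter (fun item => item ≠ "") with hfdef
  rw [show f.map (fun item => item) = f from List.map_id' f]
  rw [← PySem.Set.ofList_eq_foldl]
  rw [foldlB_eq_adjAux]
  simp only [List.nil_append, List.getLast?_nil]
  have hsortedf : (PySem.List.sorted f (fun x => x) false).Pairwise (· ≤ ·) :=
    PySem.List.sorted_pairwise f (fun x => x)
  obtain ⟨hlt, hmem⟩ := adjAux_none _ hsortedf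
  have hLlt : (PySem.List.sorted (PySem.Set.ofList f) (fun x => x) false).Pairwise (· < ·) :=
    PySem.List.sorted_ofList_pairwise_lt f
  have hperm : (PySem.List.sorted (PySem.Set.ofList f) (fun x => x) false).Perm
      (adjAux none (PySem.List.sorted f (fun x => x) false)) := by
    refine (List.perm_ext_iff_of_nodup (hLlt.imp ne_of_lt) (hlt.imp ne_of_lt)).mpr ?_
    intro y
    rw [PySem.List.mem_sorted, hmem y, PySem.List.mem_sorted, PySem.Set.mem_ofList]
  exact List.Perm.eq_of_pairwise (fun a b _ _ h1 h2 => absurd h2 (lt_asymm h1)) hLlt hlt hperm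

-- ===== VERDICT (by name: the statement is the Claim_ definition above) =====
theorem dedupe_expiries_py_spec : Claim_equal_dedupe_expiries_py := by
  intro expiries _
  unfold Spec_dedupe_expiries_py
  exact ports_agree expiries
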